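-- pv_equiv track=rewrite | github.com/gerlacdt/pytudes | advent_2021/day02.py | submarine
-- ===== SOURCE A (Python) =====
-- def submarine(commands):
--     depth = horizontal = 0
--     for c in commands:
--         direction = c[0]
--         val = c[1]
--         if direction == "forward":
--             horizontal += val
--         elif direction == "down":
--             depth += val
--         elif direction == "up":
--             depth -= val
--     return horizontal * depth
-- ===== SOURCE B (Python) =====
-- def submarine(commands):
--     horizontal = sum(c[1] for c in commands if c[0] == "forward")
--     down = sum(c[1] for c in commands if c[0] == "down")
--     up = sum(c[1] for c in commands if c[0] == "up")
--     return horizontal * (down - up)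
-- ===== Notes on version B (the rewrite author's own statement) =====
-- stated objective: alternative
-- what changed: Replaces the single interleaved loop with branching state updates by three independent filtered sums (forward, down, up) combined at the end as horizontal*(down-up).
import Mathlib
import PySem

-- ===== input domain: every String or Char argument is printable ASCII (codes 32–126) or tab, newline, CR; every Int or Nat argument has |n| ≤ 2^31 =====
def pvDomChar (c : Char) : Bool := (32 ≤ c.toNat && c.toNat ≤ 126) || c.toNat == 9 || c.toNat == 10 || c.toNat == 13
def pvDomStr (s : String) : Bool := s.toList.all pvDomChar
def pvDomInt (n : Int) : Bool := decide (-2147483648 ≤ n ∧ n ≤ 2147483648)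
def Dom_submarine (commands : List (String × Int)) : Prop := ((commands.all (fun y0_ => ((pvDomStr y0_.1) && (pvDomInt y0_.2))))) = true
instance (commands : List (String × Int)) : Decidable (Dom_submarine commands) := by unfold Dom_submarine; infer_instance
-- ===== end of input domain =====

-- B computes the result by three independent filtered sums instead of one branching fold (alternative decomposition, same cost).


-- ===== PORT A =====
def submarine (commands : List (String × Int)) : Int :=
  let st := commands.foldl (fun (st : Int × Int) c =>
    let direction := c.1
    let val := c.2
    if direction == "forward" then (st.1, st.2 + val)
    else if direction == "down" then (st.1 + val, st.2)
    else if direction == "up" then (st.1 - val, st.2)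
    else st) (0, 0)
  st.2 * st.1

-- ===== PORT B =====
def submarine_alt (commands : List (String × Int)) : Int :=
  let horizontal := ((commands.filter (fun c => c.1 == "forward")).map (·.2)).sum
  let down := ((commands.filter (fun c => c.1 == "down")).map (·.2)).sum
  let up := ((commands.filter (fun c => c.1 == "up")).map (·.2)).sum
  horizontal * (down - up)

-- ===== PRECONDITION & SPEC =====
def Spec_submarine (commands : List (String × Int)) (out : Int) : Prop := out = submarine_alt commands
instance (commands : List (String × Int)) (out : Int) : Decidable (Spec_submarine commands out) := by unfold Spec_submarine; infer_instance

-- ===== CLAIM (what is proved, stated in full; the proofs are below) =====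
def Claim_equal_submarine : Prop := ∀ (commands : List (String × Int)), Dom_submarine commands → Spec_submarine commands (submarine commands)

-- ===== LEMMAS AND PROOFS =====
-- loop invariant: the fold's final state, started from (d, h), shifts by the three filtered sums
lemma submarine_fold (commands : List (String × Int)) (d h : Int) :
    commands.foldl (fun (st : Int × Int) c =>
      let direction := c.1
      let val := c.2
      if direction == "forward" then (st.1, st.2 + val)
      else if direction == "down" then (st.1 + val, st.2)
      else if direction == "up" then (st.1 - val, st.2)
      else st) (d, h)
    = (d + ((commands.filter (fun c => c.1 == "down")).map (·.2)).sum
         - ((commands.filter (fun c => c.1 == "up")).map (·.2)).sum,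
       h + ((commands.filter (fun c => c.1 == "forward")).map (·.2)).sum) := by
  induction commands generalizing d h with
  | nil => simp
  | cons c cs ih =>
    simp only [List.foldl_cons, List.filter_cons]
    by_cases hf : c.1 == "forward" <;> by_cases hd : c.1 == "down" <;> by_cases hu : c.1 == "up" <;>
      simp_all <;> ring

-- ===== VERDICT (by name: the statement is the Claim_ definition above) =====
theorem submarine_spec : Claim_equal_submarine := by
  intro commands _
  show submarine commands = submarine_alt commands
  simp only [submarine, submarine_alt, submarine_fold]
  ring
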